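-- pv_equiv track=rewrite | github.com/apache/mesos | support/mesos-split.py | find_project
-- ===== SOURCE A (Python) =====
-- BASE_PROJECT = "mesos"
--
-- SUBPROJECTS = {
--     "libprocess": "3rdparty/libprocess",
--     "stout": "3rdparty/stout"
-- }
--
-- def find_project(filename):
--     """Find a project using its filename."""
--
--     # Find longest prefix match.
--     found_path_len = 0
--     found_project = BASE_PROJECT
--     for project, path in SUBPROJECTS.items():
--         if filename.startswith(path) and len(path) > found_path_len:
--             found_path_len = len(path)
--             found_project = project
--
--     return found_project
-- ===== SOURCE B (Python) =====
-- BASE_PROJECT = "mesos"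
--
-- SUBPROJECTS = {
--     "libprocess": "3rdparty/libprocess",
--     "stout": "3rdparty/stout"
-- }
--
-- PATH_TO_PROJECT = {path: project for project, path in SUBPROJECTS.items()}
-- PATH_LENGTHS = sorted({len(path) for path in PATH_TO_PROJECT}, reverse=True)
--
-- def find_project(filename):
--     """Find a project using its filename."""
--     # Reverse index: look up each candidate prefix of filename (longest
--     # length first) directly in a dict keyed by subproject path.  At each
--     # length the slice can equal at most one key, so longest-first lookup
--     # realises the longest-prefix-match rule without scanning the table.
--     for n in PATH_LENGTHS:
--         project = PATH_TO_PROJECT.get(filename[:n])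
--         if project is not None:
--             return project
--     return BASE_PROJECT
-- ===== Notes on version B (the rewrite author's own statement) =====
-- stated objective: alternative
-- what changed: Replaces A's running-best startswith scan over the subproject table by a reverse dictionary keyed by path: B precomputes PATH_TO_PROJECT and the distinct path lengths sorted descending, then looks up each exact prefix slice filename[:n] in the dict, longest length first, returning the first hit (BASE_PROJECT if none); at each length the slice can equal at most one key, so longest-first lookup realises A's longest-prefix-match rule.
import Mathlib
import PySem

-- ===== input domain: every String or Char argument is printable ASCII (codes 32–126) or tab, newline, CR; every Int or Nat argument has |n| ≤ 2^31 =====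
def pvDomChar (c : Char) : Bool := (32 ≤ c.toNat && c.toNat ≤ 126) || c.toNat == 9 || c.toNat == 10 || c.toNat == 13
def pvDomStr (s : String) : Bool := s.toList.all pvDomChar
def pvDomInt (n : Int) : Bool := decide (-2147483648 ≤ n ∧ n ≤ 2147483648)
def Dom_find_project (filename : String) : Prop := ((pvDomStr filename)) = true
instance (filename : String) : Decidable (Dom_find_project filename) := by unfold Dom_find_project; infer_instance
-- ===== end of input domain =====

-- B replaces A's running-best startswith scan over the subproject table by a reverse
-- index keyed by path, probed with exact prefix slices longest-length-first (objective: alternative).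
-- ===== PORT A =====
def pvBASE_PROJECT : String := "mesos"

def pvSUBPROJECTS : List (String × String) :=
  [("libprocess", "3rdparty/libprocess"), ("stout", "3rdparty/stout")]

-- literal port of A: fold carrying (found_path_len, found_project)
def find_project (filename : String) : String :=
  (pvSUBPROJECTS.foldl
    (fun st pp =>
      if PySem.Str.startswith filename pp.2 && decide (st.1 < (PySem.Str.len pp.2 : Int))
      then ((PySem.Str.len pp.2 : Int), pp.1) else st)
    ((0 : Int), pvBASE_PROJECT)).2

-- ===== PORT B =====
-- PATH_TO_PROJECT = {path: project for project, path in SUBPROJECTS.items()}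
def pvPATH_TO_PROJECT : PySem.Dict String String :=
  PySem.Dict.ofList (pvSUBPROJECTS.map (fun kv => (kv.2, kv.1)))

-- PATH_LENGTHS = sorted({len(path) for path in PATH_TO_PROJECT}, reverse=True)
def pvPATH_LENGTHS : List Int :=
  PySem.List.sorted
    (PySem.Set.ofList (pvPATH_TO_PROJECT.keys.map (fun p => (PySem.Str.len p : Int))))
    (fun x => x) true

-- the 'for n in PATH_LENGTHS: … return' loop of B
def pvLookupLoop (filename : String) : List Int → String
  | [] => pvBASE_PROJECT
  | n :: rest =>
    match PySem.Dict.get? pvPATH_TO_PROJECT (PySem.Str.slice filename none (some n)) with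
    | some project => project
    | none => pvLookupLoop filename rest

def find_project_alt (filename : String) : String :=
  pvLookupLoop filename pvPATH_LENGTHS

-- ===== PRECONDITION & SPEC =====
def Spec_find_project (filename : String) (out : String) : Prop := out = find_project_alt filename
instance (filename : String) (out : String) : Decidable (Spec_find_project filename out) := by unfold Spec_find_project; infer_instance

-- ===== CLAIM (what is proved, stated in full; the proofs are below) =====
def Claim_equal_find_project : Prop := ∀ (filename : String), Dom_find_project filename → Spec_find_project filename (find_project filename)

-- ===== LEMMAS AND PROOFS =====

-- a length-n prefix slice equals a string of length n iff the string is a prefix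
theorem pv_slice_eq_iff (s p : String) (n : Nat) (hp : p.toList.length = n) :
    (PySem.Str.slice s none (some (n : Int)) = p) ↔ PySem.Str.startswith s p = true := by
  have hsl : (PySem.Str.slice s none (some (n : Int))).toList = s.toList.take n := by
    simp [PySem.Str.toList_slice, PySem.List.slice_to_natCast]
  rw [PySem.Str.startswith_eq, PySem.Chars.startswith_iff, List.prefix_iff_eq_take,
    ← String.toList_inj, hsl, hp]
  exact ⟨Eq.symm, Eq.symm⟩

-- if a prefix slice of length n ≥ |p| equals p, then p is a prefix of s
theorem pv_startswith_of_slice_eq (s p : String) (n m : Nat) (hp : p.toList.length = m)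
    (hmn : m ≤ n) (h : PySem.Str.slice s none (some (n : Int)) = p) :
    PySem.Str.startswith s p = true := by
  rw [← pv_slice_eq_iff s p m hp]
  have hsl : ∀ k : Nat, (PySem.Str.slice s none (some (k : Int))).toList = s.toList.take k := by
    intro k; simp [PySem.Str.toList_slice, PySem.List.slice_to_natCast]
  rw [← String.toList_inj, hsl] at h ⊢
  calc List.take m s.toList = List.take m (List.take n s.toList) := by
        rw [List.take_take]; congr 1; omega
    _ = List.take m p.toList := by rw [h]
    _ = p.toList := by rw [← hp, List.take_length]

-- a prefix slice of length n can never equal a string longer than n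
theorem pv_slice_ne_longer (s p : String) (n m : Nat) (hp : p.toList.length = m)
    (h : n < m) : PySem.Str.slice s none (some (n : Int)) ≠ p := by
  intro he
  have := congrArg (fun t => t.toList.length) he
  simp [PySem.Str.toList_slice, PySem.List.slice_to_natCast, hp] at this
  omega

theorem pv_main : ∀ filename, find_project filename = find_project_alt filename := by
  intro filename
  have h19 := pv_slice_eq_iff filename "3rdparty/libprocess" 19 (by decide)
  have h14 := pv_slice_eq_iff filename "3rdparty/stout" 14 (by decide)
  have hl : pvPATH_LENGTHS = [(19 : Int), (14 : Int)] := by decide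
  have hc19 : ((19 : Nat) : Int) = (19 : Int) := by norm_num
  have hc14 : ((14 : Nat) : Int) = (14 : Int) := by norm_num
  rw [hc19] at h19; rw [hc14] at h14
  have hD : pvPATH_TO_PROJECT =
      PySem.Dict.mk [("3rdparty/libprocess", "libprocess"), ("3rdparty/stout", "stout")] := by decide
  have hlen1 : ("3rdparty/libprocess".length) = 19 := rfl
  have hlen2 : ("3rdparty/stout".length) = 14 := rfl
  unfold find_project_alt
  rw [hl]
  by_cases hL : PySem.Str.startswith filename "3rdparty/libprocess" = true <;>
  by_cases hS : PySem.Str.startswith filename "3rdparty/stout" = true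
  · -- libprocess is a prefix: both sides give "libprocess"
    have e19 := h19.mpr hL
    have hB : pvLookupLoop filename [(19 : Int), (14 : Int)] = "libprocess" := by
      simp [pvLookupLoop, hD, PySem.Dict.get?_mk_cons, e19]
    rw [hB]
    simp at hL hS
    simp [find_project, pvSUBPROJECTS, pvBASE_PROJECT, hL, hS, PySem.Str.len, hlen1, hlen2]
  · have e19 := h19.mpr hL
    have hB : pvLookupLoop filename [(19 : Int), (14 : Int)] = "libprocess" := by
      simp [pvLookupLoop, hD, PySem.Dict.get?_mk_cons, e19]
    rw [hB]
    simp at hL hS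
    simp [find_project, pvSUBPROJECTS, pvBASE_PROJECT, hL, hS, PySem.Str.len, hlen1, hlen2]
  · -- only stout is a prefix: both sides give "stout"
    have ne19 : PySem.Str.slice filename none (some (19 : Int)) ≠ "3rdparty/libprocess" :=
      fun he => hL (h19.mp he)
    have e14 := h14.mpr hS
    have hB : pvLookupLoop filename [(19 : Int), (14 : Int)] = "stout" := by
      by_cases hX : PySem.Str.slice filename none (some (19 : Int)) = "3rdparty/stout"
      · simp [pvLookupLoop, hD, PySem.Dict.get?_mk_cons, hX]
      · simp [pvLookupLoop, hD, Ne.symm ne19, e14, Ne.symm hX, PySem.Dict.get?]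
    rw [hB]
    simp at hL hS
    simp [find_project, pvSUBPROJECTS, pvBASE_PROJECT, hL, hS, PySem.Str.len, hlen1, hlen2]
  · -- no prefix: both sides give "mesos"
    have ne19 : PySem.Str.slice filename none (some (19 : Int)) ≠ "3rdparty/libprocess" :=
      fun he => hL (h19.mp he)
    have ne19' : PySem.Str.slice filename none (some (19 : Int)) ≠ "3rdparty/stout" := by
      intro he
      exact hS (pv_startswith_of_slice_eq filename "3rdparty/stout" 19 14 (by decide) (by omega)
        (by rw [hc19]; exact he))
    have ne14 : PySem.Str.slice filename none (some (14 : Int)) ≠ "3rdparty/stout" :=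
      fun he => hS (h14.mp he)
    have ne14' : PySem.Str.slice filename none (some (14 : Int)) ≠ "3rdparty/libprocess" := by
      have := pv_slice_ne_longer filename "3rdparty/libprocess" 14 19 (by decide) (by omega)
      rwa [hc14] at this
    have hB : pvLookupLoop filename [(19 : Int), (14 : Int)] = "mesos" := by
      simp [pvLookupLoop, hD, Ne.symm ne19, Ne.symm ne19', Ne.symm ne14, Ne.symm ne14',
        pvBASE_PROJECT, PySem.Dict.get?]
    rw [hB]
    simp at hL hS
    simp [find_project, pvSUBPROJECTS, pvBASE_PROJECT, hL, hS, PySem.Str.len, hlen1, hlen2]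

-- ===== VERDICT (by name: the statement is the Claim_ definition above) =====
theorem find_project_spec : Claim_equal_find_project := by
  intro filename _
  exact pv_main filename
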